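-- pv_equiv track=rewrite | github.com/aaron031291/grace-3.1- | backend/cognitive/deterministic_alternatives.py | select_round_robin
-- ===== SOURCE A (Python) =====
-- from typing import List, Dict, Any, Optional, Callable, Tuple
--
-- def select_round_robin(
--     items: List[Any],
--     n: int,
--     start_index: int = 0
-- ) -> List[Any]:
--     """
--     Round-robin selection (deterministic).
--
--     Args:
--         items: Items to select from
--         n: Number of items to select
--         start_index: Starting index
--
--     Returns:
--         List of selected items
--     """
--     if not items:
--         return []
--
--     selected = []
--     for i in range(n):
--         index = (start_index + i) % len(items)
--         selected.append(items[index])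
--
--     return selected
-- ===== SOURCE B (Python) =====
-- def select_round_robin(items, n, start_index=0):
--     """Round-robin selection by rotating the list once and tiling it."""
--     if not items:
--         return []
--     L = len(items)
--     s = start_index % L
--     rotated = items[s:] + items[:s]
--     m = max(n, 0)
--     return (rotated * (m // L + 1))[:m]
-- ===== Notes on version B (the rewrite author's own statement) =====
-- stated objective: alternative
-- what changed: Replaces the per-element modulo-indexing loop by one rotation (items[s:]+items[:s]) followed by list tiling and a single slice.
import Mathlib
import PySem

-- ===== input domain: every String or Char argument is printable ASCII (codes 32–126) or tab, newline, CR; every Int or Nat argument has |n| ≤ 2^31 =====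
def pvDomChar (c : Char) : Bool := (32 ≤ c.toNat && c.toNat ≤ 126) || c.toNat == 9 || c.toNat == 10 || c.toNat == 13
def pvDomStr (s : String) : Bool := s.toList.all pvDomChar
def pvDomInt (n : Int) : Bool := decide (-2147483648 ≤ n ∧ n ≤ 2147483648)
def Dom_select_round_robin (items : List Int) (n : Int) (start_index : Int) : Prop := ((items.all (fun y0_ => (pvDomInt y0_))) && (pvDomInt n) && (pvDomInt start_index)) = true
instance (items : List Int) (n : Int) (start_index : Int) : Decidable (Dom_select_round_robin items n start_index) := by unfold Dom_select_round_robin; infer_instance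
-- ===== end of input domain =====

-- B builds the result by one rotation (items[s:]+items[:s]) plus tiling and a slice, instead of A's per-element modulo-indexing loop; same cost class, different decomposition.

-- ===== PORT A =====
-- literal port of A: guard on empty, then append items[(start_index+i) % len(items)] for i in range(n)
def select_round_robin (items : List Int) (n : Int) (start_index : Int) : List Int :=
  if items = [] then []
  else
    (PySem.List.pyRange 0 n 1).foldl
      (fun selected i =>
        selected ++ [PySem.List.pyGetD items (PySem.Int.mod (start_index + i) (items.length : Int)) 0])
      []

-- ===== PORT B =====
-- literal port of Source B; Python's `rotated * k` is ported as (List.replicate k rotated).flatten (exact since k ≥ 1 here)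
def select_round_robin_alt (items : List Int) (n : Int) (start_index : Int) : List Int :=
  if items = [] then []
  else
    let L : Int := items.length
    let s : Int := PySem.Int.mod start_index L
    let rotated : List Int := PySem.List.slice items (some s) none ++ PySem.List.slice items none (some s)
    let m : Int := max n 0
    PySem.List.slice ((List.replicate (PySem.Int.floordiv m L + 1).toNat rotated).flatten) none (some m)

-- ===== PRECONDITION & SPEC =====
def Spec_select_round_robin (items : List Int) (n : Int) (start_index : Int) (out : List Int) : Prop := out = select_round_robin_alt items n start_index
instance (items : List Int) (n : Int) (start_index : Int) (out : List Int) : Decidable (Spec_select_round_robin items n start_index out) := by unfold Spec_select_round_robin; infer_instance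

-- ===== CLAIM (what is proved, stated in full; the proofs are below) =====
def Claim_equal_select_round_robin : Prop := ∀ (items : List Int) (n : Int) (start_index : Int), Dom_select_round_robin items n start_index → Spec_select_round_robin items n start_index (select_round_robin items n start_index)

-- ===== LEMMAS AND PROOFS =====

theorem lemA (items : List Int) (n : Int) (start_index : Int) (h : items ≠ []) :
    select_round_robin items n start_index
      = (List.range n.toNat).map
          (fun k => items.getD (((PySem.Int.mod start_index (items.length : Int)).toNat + k) % items.length) 0) := by
  have hL : 0 < items.length := List.length_pos_iff.mpr h
  have hLpos : (0 : Int) < (items.length : Int) := by exact_mod_cast hL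
  have hs0 : 0 ≤ PySem.Int.mod start_index (items.length : Int) := PySem.Int.mod_nonneg _ hLpos
  have hscast : PySem.Int.mod start_index (items.length : Int)
      = ((PySem.Int.mod start_index (items.length : Int)).toNat : Int) :=
    (Int.toNat_of_nonneg hs0).symm
  unfold select_round_robin
  rw [if_neg h, PySem.List.foldl_append_singleton_eq_map, PySem.List.pyRange_one, List.map_map,
    List.nil_append, Int.sub_zero]
  apply List.map_congr_left
  intro k hk
  simp only [Function.comp_apply]
  have hmod : PySem.Int.mod (start_index + (0 + (k : Int))) (items.length : Int)
      = ((((PySem.Int.mod start_index (items.length : Int)).toNat + k) % items.length : Nat) : Int) := by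
    rw [PySem.Int.mod_eq_emod_of_pos hLpos]
    have hdec : start_index + (0 + (k : Int))
        = (start_index % (items.length : Int) + (k : Int)) + (items.length : Int) * (start_index / (items.length : Int)) := by
      have := Int.emod_add_ediv start_index (items.length : Int)
      linarith
    rw [hdec, Int.add_mul_emod_self_left]
    have h2 : start_index % (items.length : Int)
        = ((PySem.Int.mod start_index (items.length : Int)).toNat : Int) := by
      rw [← PySem.Int.mod_eq_emod_of_pos hLpos]; exact hscast
    rw [h2]
    norm_cast
  rw [hmod, PySem.List.pyGetD_natCast]

theorem flatten_replicate_getD (t : Nat) (xs : List Int) (k : Nat) (hk : k < t * xs.length) :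
    ((List.replicate t xs).flatten).getD k 0 = xs.getD (k % xs.length) 0 := by
  induction t generalizing k with
  | zero => simp only [Nat.zero_mul] at hk; omega
  | succ t ih =>
    have hmul : (t + 1) * xs.length = t * xs.length + xs.length := by ring
    simp only [List.replicate_succ, List.flatten_cons]
    by_cases h : k < xs.length
    · rw [List.getD_eq_getElem?_getD, List.getElem?_append_left h,
        ← List.getD_eq_getElem?_getD, Nat.mod_eq_of_lt h]
    · rw [Nat.not_lt] at h
      rw [List.getD_eq_getElem?_getD, List.getElem?_append_right h,
        ← List.getD_eq_getElem?_getD, ih (k - xs.length) (by omega)]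
      rw [← Nat.mod_eq_sub_mod h]

theorem tile_take (xs : List Int) (s m : Nat) (hs : s < xs.length) :
    List.take m ((List.replicate (m / xs.length + 1) (xs.drop s ++ xs.take s)).flatten)
      = (List.range m).map (fun k => xs.getD ((s + k) % xs.length) 0) := by
  have hL : 0 < xs.length := by omega
  have hrlen : (xs.drop s ++ xs.take s).length = xs.length := by simp; omega
  have hmlt : m < (m / xs.length + 1) * xs.length := by
    have h1 := Nat.div_add_mod m xs.length
    have h2 := Nat.mod_lt m hL
    nlinarith
  apply List.ext_getElem
  · simp only [List.length_take, List.length_flatten, List.map_replicate, List.sum_replicate,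
      smul_eq_mul, hrlen, List.length_map, List.length_range]
    omega
  · intro k hk1 hk2
    simp only [List.length_take, List.length_flatten, List.map_replicate, List.sum_replicate,
      smul_eq_mul, hrlen] at hk1
    have hkm : k < m := by omega
    rw [List.getElem_take, List.getElem_eq_getD (fallback := 0),
      flatten_replicate_getD _ _ _ (by rw [hrlen]; exact hmlt.trans_le' hkm.le)]
    simp only [List.getElem_map, List.getElem_range]
    rw [hrlen, (List.rotate_eq_drop_append_take hs.le).symm]
    have hkL : k % xs.length < xs.length := Nat.mod_lt _ hL
    rw [List.getD_eq_getElem?_getD,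
      List.getElem?_eq_getElem (by rw [List.length_rotate]; exact hkL),
      List.getElem_rotate, List.getD_eq_getElem?_getD,
      List.getElem?_eq_getElem (Nat.mod_lt _ hL)]
    simp only [Option.getD_some]
    congr 1
    conv_lhs => rw [Nat.mod_add_mod]
    rw [Nat.add_comm]

theorem lemB (items : List Int) (n : Int) (start_index : Int) (h : items ≠ []) :
    select_round_robin_alt items n start_index
      = (List.range n.toNat).map
          (fun k => items.getD (((PySem.Int.mod start_index (items.length : Int)).toNat + k) % items.length) 0) := by
  have hL : 0 < items.length := List.length_pos_iff.mpr h
  have hLpos : (0 : Int) < (items.length : Int) := by exact_mod_cast hL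
  have hs0 : 0 ≤ PySem.Int.mod start_index (items.length : Int) := PySem.Int.mod_nonneg _ hLpos
  have hsL : PySem.Int.mod start_index (items.length : Int) < (items.length : Int) :=
    PySem.Int.mod_lt _ hLpos
  have hscast : PySem.Int.mod start_index (items.length : Int)
      = ((PySem.Int.mod start_index (items.length : Int)).toNat : Int) :=
    (Int.toNat_of_nonneg hs0).symm
  have hsN : (PySem.Int.mod start_index (items.length : Int)).toNat < items.length := by omega
  have hmax : max n 0 = (n.toNat : Int) := by omega
  unfold select_round_robin_alt
  rw [if_neg h]
  show PySem.List.slice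
      ((List.replicate (PySem.Int.floordiv (max n 0) (items.length : Int) + 1).toNat
        (PySem.List.slice items (some (PySem.Int.mod start_index (items.length : Int))) none
          ++ PySem.List.slice items none (some (PySem.Int.mod start_index (items.length : Int))))).flatten)
      none (some (max n 0)) = _
  rw [hscast, PySem.List.slice_from_natCast, PySem.List.slice_to_natCast, hmax,
    PySem.Int.floordiv_natCast, ← Nat.cast_add_one, Int.toNat_natCast, PySem.List.slice_to_natCast]
  exact tile_take items _ n.toNat hsN

-- ===== VERDICT (by name: the statement is the Claim_ definition above) =====
theorem select_round_robin_spec : Claim_equal_select_round_robin := by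
  intro items n start_index _
  unfold Spec_select_round_robin
  by_cases h : items = []
  · simp [h, select_round_robin, select_round_robin_alt]
  · rw [lemA items n start_index h, lemB items n start_index h]
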